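-- pv_equiv track=rewrite | github.com/robertjvt/Attribution-Relations | Data/data_analysis.py | count_total_words_tokens
-- ===== SOURCE A (Python) =====
-- import string
--
-- def count_total_words_tokens(data, dataset):
--     token_count = 0
--     punct_count = 0
--     word_count = 0
--     exclude = set(string.punctuation)
--     for line in data:
--         for token in line:
--             if dataset == 'parc' or dataset == 'polnear':
--                 tokenz = token[8]
--             elif dataset == 'vaccorp':
--                 tokenz = token[3]
--
--             if tokenz not in exclude:
--                 word_count += 1
--             else:
--                 punct_count += 1
--             token_count += 1
--
--     return token_count, word_count, punct_count
-- ===== SOURCE B (Python) =====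
-- import string
--
--
-- def count_total_words_tokens(data, dataset):
--     if dataset == 'parc' or dataset == 'polnear':
--         col = 8
--     elif dataset == 'vaccorp':
--         col = 3
--     freq = {}
--     for line in data:
--         for token in line:
--             f = token[col]
--             freq[f] = freq.get(f, 0) + 1
--     token_count = sum(freq.values())
--     punct_count = sum(freq.get(p, 0) for p in string.punctuation)
--     return token_count, token_count - punct_count, punct_count
-- ===== Notes on version B (the rewrite author's own statement) =====
-- stated objective: alternative
-- what changed: Instead of testing each token against the punctuation set inside the loop, B builds a frequency dictionary of the extracted fields in one pass (with the dataset column hoisted out of the loop), then derives token_count as the sum of the counts, punct_count as 32 dictionary lookups (one per punctuation character), and word_count by subtraction.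
import Mathlib
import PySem

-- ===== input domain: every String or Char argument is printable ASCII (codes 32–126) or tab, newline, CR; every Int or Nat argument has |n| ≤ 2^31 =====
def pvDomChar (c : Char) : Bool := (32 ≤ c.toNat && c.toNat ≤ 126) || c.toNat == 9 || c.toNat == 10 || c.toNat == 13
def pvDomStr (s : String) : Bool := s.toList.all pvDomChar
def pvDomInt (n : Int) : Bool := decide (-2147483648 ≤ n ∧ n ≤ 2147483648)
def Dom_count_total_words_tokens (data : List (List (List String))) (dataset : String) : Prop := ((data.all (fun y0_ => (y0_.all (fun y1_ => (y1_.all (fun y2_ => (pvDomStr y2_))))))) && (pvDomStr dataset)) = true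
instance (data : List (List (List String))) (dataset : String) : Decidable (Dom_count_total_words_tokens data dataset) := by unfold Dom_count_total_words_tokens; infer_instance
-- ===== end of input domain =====

-- B change (objective: alternative): B builds a frequency dictionary of the extracted fields
-- (dataset column hoisted out of the loop), then token_count = sum of the counts,
-- punct_count = one lookup per punctuation character, word_count by subtraction.

-- set(string.punctuation): the 32 ASCII punctuation characters, as one-character strings,
-- in string.punctuation order
def pvPunct : List String :=
  ["!", "\"", "#", "$", "%", "&", "'", "(", ")", "*", "+", ",", "-", ".", "/",
   ":", ";", "<", "=", ">", "?", "@", "[", "\\", "]", "^", "_", "`", "{", "|", "}", "~"]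

-- ===== PORT A =====
-- A's loop body: extract tokenz by the dataset if/elif, then bump (token, word, punct) counters.
-- Under Pre_ the indexing token[8]/token[3] is in range; the .getD "" never fires inside Pre_.
def pvStep (dataset : String) (st : Int × Int × Int) (token : List String) : Int × Int × Int :=
  let tokenz : String :=
    if dataset = "parc" ∨ dataset = "polnear" then (PySem.List.pyGet? token 8).getD ""
    else if dataset = "vaccorp" then (PySem.List.pyGet? token 3).getD ""
    else ""
  if ¬ (pvPunct.contains tokenz) then (st.1 + 1, st.2.1 + 1, st.2.2)
  else (st.1 + 1, st.2.1, st.2.2 + 1)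

-- A's nested for-loops with three running counters
def count_total_words_tokens (data : List (List (List String))) (dataset : String) : Int × Int × Int :=
  data.foldl (fun (st : Int × Int × Int) line => line.foldl (pvStep dataset) st) (0, 0, 0)

-- ===== PORT B =====
-- Source B hoists the dataset column out of the loop; on an unknown dataset Python leaves col
-- unbound and raises at token[col] (outside Pre_); the 0 placeholder is never read inside Pre_
def pvCol (dataset : String) : Int :=
  if dataset = "parc" ∨ dataset = "polnear" then 8
  else if dataset = "vaccorp" then 3
  else 0

-- Source B's freq loop: freq[f] = freq.get(f, 0) + 1 over every token of every line
def pvFreq (data : List (List (List String))) (dataset : String) : PySem.Dict String Int :=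
  data.foldl (fun d line =>
    line.foldl (fun (d : PySem.Dict String Int) token =>
      let f := (PySem.List.pyGet? token (pvCol dataset)).getD ""
      d.insert f (d.getD f 0 + 1)) d) PySem.Dict.empty

-- token_count = sum(freq.values())
def pvTokenCount (data : List (List (List String))) (dataset : String) : Int :=
  ((pvFreq data dataset).values).sum

-- punct_count = sum(freq.get(p, 0) for p in string.punctuation)
def pvPunctCount (data : List (List (List String))) (dataset : String) : Int :=
  (pvPunct.map (fun p => (pvFreq data dataset).getD p 0)).sum

def count_total_words_tokens_alt (data : List (List (List String))) (dataset : String) : Int × Int × Int :=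
  (pvTokenCount data dataset,
   pvTokenCount data dataset - pvPunctCount data dataset,
   pvPunctCount data dataset)

-- ===== PRECONDITION & SPEC =====
-- Pre_ excludes the inputs on which Python A raises: a token reached with an unknown dataset
-- name (UnboundLocalError) or with too few fields for the dataset's index (IndexError).
def Pre_count_total_words_tokens (data : List (List (List String))) (dataset : String) : Prop :=
  ∀ line ∈ data, ∀ token ∈ line,
    ((dataset = "parc" ∨ dataset = "polnear") ∧ 9 ≤ token.length) ∨
    (dataset = "vaccorp" ∧ 4 ≤ token.length)
instance (data : List (List (List String))) (dataset : String) : Decidable (Pre_count_total_words_tokens data dataset) := by unfold Pre_count_total_words_tokens; infer_instance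

def pvWitness_count_total_words_tokens : List (List (List String)) × String :=
  ([[["a", "b", "c", "d", "e", "f", "g", "h", "."],
     ["a", "b", "c", "d", "e", "f", "g", "h", "word"]]], "parc")

def Spec_count_total_words_tokens (data : List (List (List String))) (dataset : String) (out : Int × Int × Int) : Prop := out = count_total_words_tokens_alt data dataset
instance (data : List (List (List String))) (dataset : String) (out : Int × Int × Int) : Decidable (Spec_count_total_words_tokens data dataset out) := by unfold Spec_count_total_words_tokens; infer_instance

-- ===== CLAIM =====
def Claim_equal_count_total_words_tokens : Prop := ∀ (data : List (List (List String))) (dataset : String), Dom_count_total_words_tokens data dataset → Pre_count_total_words_tokens data dataset → Spec_count_total_words_tokens data dataset (count_total_words_tokens data dataset)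

-- ===== LEMMAS AND PROOFS =====

-- A's extraction, as a function (used only by the proofs)
def pvField (dataset : String) (token : List String) : String :=
  if dataset = "parc" ∨ dataset = "polnear" then (PySem.List.pyGet? token 8).getD ""
  else if dataset = "vaccorp" then (PySem.List.pyGet? token 3).getD ""
  else ""

theorem pvStep_eq (dataset : String) (st : Int × Int × Int) (token : List String) :
    pvStep dataset st token =
      if pvPunct.contains (pvField dataset token) then (st.1 + 1, st.2.1, st.2.2 + 1)
      else (st.1 + 1, st.2.1 + 1, st.2.2) := by
  unfold pvStep pvField
  rw [ite_not]

theorem pvFold_eq (dataset : String) (toks : List (List String)) (st : Int × Int × Int) :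
    toks.foldl (pvStep dataset) st =
      (st.1 + toks.length,
       st.2.1 + ((toks.length : Int) - (toks.countP (fun t => pvPunct.contains (pvField dataset t)) : Nat)),
       st.2.2 + (toks.countP (fun t => pvPunct.contains (pvField dataset t)) : Nat)) := by
  induction toks generalizing st with
  | nil => simp
  | cons t ts ih =>
    rw [List.foldl_cons, pvStep_eq, List.countP_cons, ih]
    by_cases h : pvPunct.contains (pvField dataset t) = true
    · simp only [h, if_true, Prod.mk.injEq]
      refine ⟨?_, ?_, ?_⟩ <;> (push_cast [List.length_cons]; ring)
    · simp only [h, Prod.mk.injEq]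
      refine ⟨?_, ?_, ?_⟩ <;> (push_cast [List.length_cons]; ring)

theorem count_A_eq (data : List (List (List String))) (dataset : String) :
    count_total_words_tokens data dataset =
      data.flatten.foldl (pvStep dataset) (0, 0, 0) := by
  unfold count_total_words_tokens
  generalize (((0 : Int), (0 : Int), (0 : Int)) : Int × Int × Int) = init
  induction data generalizing init with
  | nil => rfl
  | cons l ls ih => simp [List.flatten_cons, List.foldl_append, ih]

-- B's nested counting loops build the Counter of the flattened extracted-field list
theorem freq_eq_counter (data : List (List (List String))) (dataset : String) :
    pvFreq data dataset =
    PySem.Dict.counter (data.flatten.map (fun token => (PySem.List.pyGet? token (pvCol dataset)).getD "")) := by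
  unfold pvFreq
  rw [← PySem.Dict.foldl_insert_getD_add_one_eq_counter, List.foldl_map]
  generalize (PySem.Dict.empty : PySem.Dict String Int) = init
  induction data generalizing init with
  | nil => rfl
  | cons l ls ih => simp [List.flatten_cons, List.foldl_append, ih]

-- Σ_{p ∈ P} (if x = p then 1 else 0) over a duplicate-free P is the membership indicator
theorem sum_indicator_of_nodup (P : List String) (hP : P.Nodup) (x : String) :
    ((P.map (fun p => if x = p then (1 : Int) else 0)).sum) =
      (if P.contains x then (1 : Int) else 0) := by
  induction P with
  | nil => simp
  | cons q Q ih =>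
    rcases List.nodup_cons.mp hP with ⟨hq, hQ⟩
    by_cases hxq : x = q
    · subst hxq
      have hc : Q.contains x = false := by
        simp only [List.contains_eq_mem, decide_eq_false_iff_not]; exact hq
      simp [ih hQ, hq]
    · simp [hxq, ih hQ]

-- Summing a list's counts over a duplicate-free key set P counts its members of P
theorem sum_counts_of_nodup (P : List String) (hP : P.Nodup) (xs : List String) :
    ((P.map (fun p => (xs.count p : Int))).sum) =
      (xs.countP (fun x => P.contains x) : Nat) := by
  induction xs with
  | nil => simp
  | cons x t ih =>
    have hcnt : ∀ p, ((x :: t).count p : Int) =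
        (t.count p : Int) + (if x = p then 1 else 0) := by
      intro p
      by_cases h : x = p
      · subst h; simp [List.count_cons_self]
      · simp [h]
    calc ((P.map (fun p => ((x :: t).count p : Int))).sum)
        = ((P.map (fun p => (t.count p : Int) + (if x = p then 1 else 0))).sum) := by
          exact congrArg List.sum (List.map_congr_left (fun p _ => hcnt p))
      _ = ((P.map (fun p => (t.count p : Int))).sum) +
          ((P.map (fun p => if x = p then (1 : Int) else 0)).sum) := by
          rw [← List.sum_map_add]
      _ = ((t.countP (fun y => P.contains y) : Nat) : Int) +
          (if P.contains x then (1 : Int) else 0) := by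
          rw [ih, sum_indicator_of_nodup P hP x]
      _ = (((x :: t).countP (fun y => P.contains y) : Nat) : Int) := by
          rw [List.countP_cons]
          by_cases h : P.contains x = true
          · rw [if_pos h, if_pos h]; push_cast; ring
          · rw [if_neg h, if_neg h]; simp

-- sum of a Counter's values = length of the counted list
theorem sum_values_counter (xs : List String) :
    ((PySem.Dict.counter xs).values).sum = (xs.length : Int) := by
  have hv : (PySem.Dict.counter xs).values =
      (PySem.Set.ofList xs).map (fun k => (xs.count k : Int)) := by
    show ((PySem.Dict.counter xs).items).map (·.2) = _
    rw [PySem.Dict.items_counter]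
    rw [List.map_map]
    rfl
  rw [hv, sum_counts_of_nodup _ (PySem.Set.nodup_ofList xs)]
  have hlen : xs.countP (fun x => List.contains (PySem.Set.ofList xs) x) = xs.length := by
    rw [List.countP_eq_length]
    intro a ha
    simp only [List.contains_eq_mem, decide_eq_true_eq]
    exact (PySem.Set.mem_ofList xs a).mpr ha
  exact_mod_cast hlen

-- ===== VERDICT =====
theorem count_total_words_tokens_spec : Claim_equal_count_total_words_tokens := by
  intro data dataset _ hpre
  unfold Spec_count_total_words_tokens count_total_words_tokens_alt pvTokenCount pvPunctCount
  rw [count_A_eq, pvFold_eq, freq_eq_counter]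
  have hnodup : pvPunct.Nodup := by decide
  have hfield : ∀ token ∈ data.flatten,
      (PySem.List.pyGet? token (pvCol dataset)).getD "" = pvField dataset token := by
    intro token htok
    rcases List.mem_flatten.mp htok with ⟨line, hline, htl⟩
    rcases hpre line hline token htl with ⟨hds, _⟩ | ⟨hds, _⟩
    · simp [pvCol, hds, pvField]
    · have hne : ¬ (dataset = "parc" ∨ dataset = "polnear") := by
        rintro (h | h) <;> simp [h] at hds
      simp [pvCol, hds, pvField]
  have hmap : data.flatten.map (fun token => (PySem.List.pyGet? token (pvCol dataset)).getD "") =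
      data.flatten.map (pvField dataset) := List.map_congr_left hfield
  rw [hmap, sum_values_counter]
  have hgetD : ∀ p, (PySem.Dict.counter (data.flatten.map (pvField dataset))).getD p 0 =
      ((data.flatten.map (pvField dataset)).count p : Int) := fun p =>
    PySem.Dict.getD_counter _ _
  have hpunct : (pvPunct.map (fun p =>
      (PySem.Dict.counter (data.flatten.map (pvField dataset))).getD p 0)).sum =
      ((data.flatten.countP (fun t => pvPunct.contains (pvField dataset t)) : Nat) : Int) := by
    rw [List.map_congr_left (fun p _ => hgetD p),
        sum_counts_of_nodup _ hnodup, List.countP_map]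
    rfl
  rw [hpunct, List.length_map]
  simp only [Prod.mk.injEq]
  refine ⟨by ring, by ring, by ring⟩
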